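-- pv_equiv track=rewrite | github.com/mohammadfaiizan/ProjectI | DSA/Theory/Dynamic_Programming/002_dp_fibonacci_variants.py | climb_stairs_k_steps
-- ===== SOURCE A (Python) =====
-- def climb_stairs_k_steps(n: int, k: int) -> int:
--     """
--     Climbing stairs with up to k steps at a time
--
--     Time Complexity: O(n * k)
--     Space Complexity: O(n)
--
--     Args:
--         n: Number of stairs
--         k: Maximum steps allowed per move
--
--     Returns:
--         Number of ways to climb n stairs
--     """
--     if n == 0:
--         return 1
--     if n < 0:
--         return 0
--
--     dp = [0] * (n + 1)
--     dp[0] = 1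
--
--     for i in range(1, n + 1):
--         for step in range(1, min(i, k) + 1):
--             dp[i] += dp[i - step]
--
--     return dp[n]
-- ===== SOURCE B (Python) =====
-- def climb_stairs_k_steps(n: int, k: int) -> int:
--     # Sliding-window running sum over the last k dp values: O(n) instead of O(n*k).
--     if n == 0:
--         return 1
--     if n < 0 or k <= 0:
--         return 0
--     dp = [1]
--     s = 0
--     for i in range(1, n + 1):
--         s += dp[-1]
--         if i > k:
--             s -= dp[i - 1 - k]
--         dp.append(s)
--     return dp[n]
-- ===== Notes on version B (the rewrite author's own statement) =====
-- stated objective: faster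
-- what changed: Replaces the O(n*k) inner loop (re-summing up to k previous dp entries for every stair) with a single O(n) pass maintaining a sliding-window running sum of the last k dp values.
import Mathlib
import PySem

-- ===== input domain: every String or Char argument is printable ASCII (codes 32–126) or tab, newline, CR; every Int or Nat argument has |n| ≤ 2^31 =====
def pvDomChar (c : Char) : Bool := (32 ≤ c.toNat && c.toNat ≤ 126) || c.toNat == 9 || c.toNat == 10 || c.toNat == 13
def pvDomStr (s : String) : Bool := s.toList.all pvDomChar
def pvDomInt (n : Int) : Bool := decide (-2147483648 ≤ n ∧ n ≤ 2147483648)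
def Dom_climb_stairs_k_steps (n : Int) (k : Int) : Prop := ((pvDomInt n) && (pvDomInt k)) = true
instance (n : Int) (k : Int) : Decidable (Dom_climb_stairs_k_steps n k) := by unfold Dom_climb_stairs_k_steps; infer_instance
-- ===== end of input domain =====

-- B replaces A's O(n*k) inner re-summation with a single O(n) pass keeping a sliding-window
-- running sum of the last k dp values (objective: faster, asymptotic).

-- ===== PORT A =====
def climb_stairs_k_steps (n : Int) (k : Int) : Int :=
  if n = 0 then 1
  else if n < 0 then 0
  else
    -- dp = [0] * (n + 1); dp[0] = 1
    let dp0 := PySem.List.pySetD (List.replicate (n+1).toNat (0:Int)) 0 1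
    -- for i in range(1, n + 1): for step in range(1, min(i, k) + 1): dp[i] += dp[i - step]
    let dp := (PySem.List.pyRange 1 (n+1) 1).foldl (fun dp i =>
        (PySem.List.pyRange 1 (min i k + 1) 1).foldl (fun d step =>
           PySem.List.pySetD d i (PySem.List.pyGetD d i 0 + PySem.List.pyGetD d (i - step) 0)) dp) dp0
    PySem.List.pyGetD dp n 0

-- ===== PORT B =====
def climb_stairs_k_steps_alt (n : Int) (k : Int) : Int :=
  if n = 0 then 1
  else if n < 0 ∨ k ≤ 0 then 0
  else
    -- dp = [1]; s = 0
    -- for i in range(1, n+1): s += dp[-1]; if i > k: s -= dp[i-1-k]; dp.append(s)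
    let st := (PySem.List.pyRange 1 (n+1) 1).foldl (fun (st : List Int × Int) i =>
        let s := st.2 + PySem.List.pyGetD st.1 (-1) 0
        let s := if i > k then s - PySem.List.pyGetD st.1 (i - 1 - k) 0 else s
        (st.1 ++ [s], s)) ([1], 0)
    PySem.List.pyGetD st.1 n 0

-- ===== PRECONDITION & SPEC =====
def Spec_climb_stairs_k_steps (n : Int) (k : Int) (out : Int) : Prop := out = climb_stairs_k_steps_alt n k
instance (n : Int) (k : Int) (out : Int) : Decidable (Spec_climb_stairs_k_steps n k out) := by unfold Spec_climb_stairs_k_steps; infer_instance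

-- ===== CLAIM (what is proved, stated in full; the proofs are below) =====
def Claim_equal_climb_stairs_k_steps : Prop := ∀ (n : Int) (k : Int), Dom_climb_stairs_k_steps n k → Spec_climb_stairs_k_steps n k (climb_stairs_k_steps n k)

-- ===== LEMMAS AND PROOFS =====

-- The common reference: pvHist k m = the list of the first m+1 dp values, each new value being
-- A's window sum over the previous ones; pvVal k j = dp[j].
def pvHist (k : Int) : Nat → List Int
  | 0 => [1]
  | m+1 =>
    pvHist k m ++ [((PySem.List.pyRange 1 (min ((m:Int)+1) k + 1) 1).map
        (fun s => PySem.List.pyGetD (pvHist k m) (((m:Int)+1) - s) 0)).sum]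

def pvVal (k : Int) (j : Nat) : Int := (pvHist k j).getD j 0

theorem pvHist_length (k : Int) : ∀ m, (pvHist k m).length = m + 1 := by
  intro m
  induction m with
  | zero => rfl
  | succ m ih => simp [pvHist, ih]

theorem pvHist_get (k : Int) {j m : Nat} (h : j ≤ m) :
    (pvHist k m).getD j 0 = pvVal k j := by
  induction m with
  | zero => interval_cases j; rfl
  | succ m ih =>
    rcases Nat.lt_or_ge j (m+1) with hj | hj
    · rw [pvHist, List.getD_append _ _ _ _ (by rw [pvHist_length]; omega)]
      exact ih (by omega)
    · have : j = m + 1 := by omega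
      subst this; rfl

theorem pvHist_succ (k : Int) (m : Nat) :
    pvHist k (m+1) = pvHist k m ++ [pvVal k (m+1)] := by
  conv_lhs => rw [pvHist]
  congr 2
  symm
  rw [pvVal]
  conv_lhs => rw [pvHist]
  rw [List.getD_append_right _ _ _ _ (by rw [pvHist_length])]
  rw [pvHist_length]
  simp

-- getD after set, away from / at the set position
theorem pv_getD_set_ne (l : List Int) (i j : Nat) (v d : Int) (h : j ≠ i) :
    (l.set i v).getD j d = l.getD j d := by
  simp [List.getD_eq_getElem?_getD, List.getElem?_set_ne (by omega : i ≠ j)]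

theorem pv_getD_set_self (l : List Int) (i : Nat) (v d : Int) (h : i < l.length) :
    (l.set i v).getD i d = v := by
  simp [List.getD_eq_getElem?_getD, h]

-- A's inner loop: repeatedly adding dp[i-step] into dp[i] is one set of dp[i] to dp[i] + the sum.
theorem pvFoldSet (i : Nat) :
    ∀ (steps : List Int) (dp : List Int), i < dp.length →
    (∀ s ∈ steps, 1 ≤ s ∧ s ≤ (i:Int)) →
    steps.foldl (fun d step =>
        PySem.List.pySetD d (i:Int) (PySem.List.pyGetD d (i:Int) 0 + PySem.List.pyGetD d ((i:Int) - step) 0)) dp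
    = dp.set i (dp.getD i 0 + (steps.map (fun s => PySem.List.pyGetD dp ((i:Int) - s) 0)).sum) := by
  intro steps
  induction steps with
  | nil =>
    intro dp hlen _
    simp only [List.foldl_nil, List.map_nil, List.sum_nil, add_zero]
    rw [List.getD_eq_getElem dp 0 hlen]
    exact (List.set_getElem_self hlen).symm
  | cons s rest ih =>
    intro dp hlen hmem
    obtain ⟨hs1, hs2⟩ := hmem s (by simp)
    have hidx : (i:Int) - s = ((i - s.toNat : Nat) : Int) := by omega
    have hne : (i - s.toNat : Nat) ≠ i := by omega
    simp only [List.foldl_cons]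
    rw [PySem.List.pySetD_natCast, ih _ (by simpa using hlen)
      (fun t ht => hmem t (by simp [ht]))]
    rw [List.set_set]
    congr 1
    rw [pv_getD_set_self _ _ _ _ hlen]
    have hrest : rest.map (fun t => PySem.List.pyGetD (dp.set i
        (PySem.List.pyGetD dp (i:Int) 0 + PySem.List.pyGetD dp ((i:Int) - s) 0)) ((i:Int) - t) 0)
        = rest.map (fun t => PySem.List.pyGetD dp ((i:Int) - t) 0) := by
      apply List.map_congr_left
      intro t ht
      obtain ⟨ht1, ht2⟩ := hmem t (by simp [ht])
      have hc : (i:Int) - t = ((i - t.toNat : Nat) : Int) := by omega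
      simp only [hc, PySem.List.pyGetD_natCast]
      exact pv_getD_set_ne _ _ _ _ _ (by omega)
    rw [hrest]
    simp only [List.map_cons, List.sum_cons, PySem.List.pyGetD_natCast]
    ring

def pvPad (k : Int) (N m : Nat) : List Int := pvHist k m ++ List.replicate (N - m) 0

theorem pvPad_length (k : Int) (N m : Nat) (h : m ≤ N) : (pvPad k N m).length = N + 1 := by
  simp [pvPad, pvHist_length]; omega

-- A's outer loop invariant
theorem pvA_loop (k : Int) (N : Nat) : ∀ m, m ≤ N →
    (PySem.List.pyRange 1 ((m:Int)+1) 1).foldl (fun dp i =>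
        (PySem.List.pyRange 1 (min i k + 1) 1).foldl (fun d step =>
           PySem.List.pySetD d i (PySem.List.pyGetD d i 0 + PySem.List.pyGetD d (i - step) 0)) dp)
      (pvPad k N 0)
    = pvPad k N m := by
  intro m
  induction m with
  | zero => intro _; rw [PySem.List.pyRange_one_eq_nil (by omega)]; rfl
  | succ m ih =>
    intro hm
    have h1 : ((m+1:Nat):Int) + 1 = (((m:Nat):Int) + 1) + 1 := by push_cast; ring
    rw [h1, PySem.List.pyRange_one_succ_right (by omega), List.foldl_append, ih (by omega)]
    simp only [List.foldl_cons, List.foldl_nil]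
    have hcast : ((m:Int) + 1) = ((m+1 : Nat) : Int) := by push_cast; ring
    rw [hcast, pvFoldSet (m+1) _ _ (by rw [pvPad_length k N m (by omega)]; omega)
      (by intro s hs; rw [PySem.List.mem_pyRange_one] at hs; omega)]
    -- the value read at position m+1 is 0 (still in the zero padding)
    have hget0 : (pvPad k N m).getD (m+1) 0 = 0 := by
      rw [pvPad, List.getD_append_right _ _ _ _ (by rw [pvHist_length])]
      simp [pvHist_length, List.getD_eq_getElem?_getD]
    -- the mapped reads only touch the pvHist prefix
    have hmap : ((PySem.List.pyRange 1 (min ((m+1:Nat):Int) k + 1) 1).map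
        (fun s => PySem.List.pyGetD (pvPad k N m) (((m+1:Nat):Int) - s) 0))
        = ((PySem.List.pyRange 1 (min ((m:Int)+1) k + 1) 1).map
        (fun s => PySem.List.pyGetD (pvHist k m) (((m:Int)+1) - s) 0)) := by
      rw [← hcast]
      apply List.map_congr_left
      intro s hs
      rw [PySem.List.mem_pyRange_one] at hs
      have hj : ((m:Int) + 1) - s = ((m + 1 - s.toNat : Nat) : Int) := by omega
      rw [hj, PySem.List.pyGetD_natCast, PySem.List.pyGetD_natCast, pvPad,
        List.getD_append _ _ _ _ (by rw [pvHist_length]; omega)]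
    rw [hget0, hmap, zero_add]
    -- now perform the set: it lands on the first element of the zero padding
    rw [pvPad, List.set_append, if_neg (by rw [pvHist_length]; omega), pvHist_length]
    have hrep : N - m = (N - (m+1)) + 1 := by omega
    rw [hrep, List.replicate_succ]
    simp only [Nat.sub_self, List.set_cons_zero]
    rw [pvPad]
    conv_rhs => rw [pvHist]
    simp

-- A computes pvVal
theorem pvA_val (n k : Int) (hn : 1 ≤ n) : climb_stairs_k_steps n k = pvVal k n.toNat := by
  rw [climb_stairs_k_steps, if_neg (by omega), if_neg (by omega)]
  have hstart : PySem.List.pySetD (List.replicate (n+1).toNat (0:Int)) 0 1 = pvPad k n.toNat 0 := by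
    have h0 : (0:Int) = ((0:Nat):Int) := rfl
    rw [h0, PySem.List.pySetD_natCast]
    have : (n+1).toNat = n.toNat + 1 := by omega
    rw [this, List.replicate_succ, List.set_cons_zero]
    simp [pvPad, pvHist]
  have hb : n + 1 = ((n.toNat : Nat):Int) + 1 := by omega
  rw [hstart, hb]
  dsimp only
  rw [pvA_loop k n.toNat n.toNat le_rfl]
  have : (n:Int) = ((n.toNat : Nat):Int) := by omega
  rw [this, PySem.List.pyGetD_natCast, pvPad]
  simp only [Nat.sub_self, List.replicate_zero, List.append_nil]
  exact pvHist_get k le_rfl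

-- list sum over range = Finset sum
theorem pv_sum_map_range (f : Nat → Int) : ∀ n, ((List.range n).map f).sum = ∑ j ∈ Finset.range n, f j := by
  intro n
  induction n with
  | zero => rfl
  | succ n ih => rw [List.range_succ, Finset.sum_range_succ]; simp [ih]

-- the window sum as a Finset
def pvW (k : Int) (m : Nat) : Int := ∑ j ∈ Finset.Ico (m - k.toNat) m, pvVal k j

theorem pvVal_succ (k : Int) (m : Nat) : pvVal k (m+1) = pvW k (m+1) := by
  have hx : pvVal k (m+1) = ((PySem.List.pyRange 1 (min ((m:Int)+1) k + 1) 1).map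
      (fun s => PySem.List.pyGetD (pvHist k m) (((m:Int)+1) - s) 0)).sum := by
    rw [pvVal]
    conv_lhs => rw [pvHist]
    rw [List.getD_append_right _ _ _ _ (by rw [pvHist_length]), pvHist_length]
    simp
  rw [hx, pvW]
  by_cases hk : k ≤ 0
  · rw [PySem.List.pyRange_one_eq_nil (by omega)]
    have hz : k.toNat = 0 := by omega
    simp [hz]
  · have hkk : 1 ≤ k := by omega
    have hc : min ((m:Int)+1) k = ((min (m+1) k.toNat : Nat) : Int) := by omega
    rw [hc, PySem.List.pyRange_one]
    have hlen : (((min (m+1) k.toNat : Nat) : Int) + 1 - 1).toNat = min (m+1) k.toNat := by omega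
    rw [hlen, List.map_map]
    have hmap : (List.range (min (m+1) k.toNat)).map
        ((fun s => PySem.List.pyGetD (pvHist k m) (((m:Int)+1) - s) 0) ∘ (fun r : Nat => (1:Int) + (r:Int)))
        = (List.range (min (m+1) k.toNat)).map (fun r => pvVal k (m - r)) := by
      apply List.map_congr_left
      intro r hr
      rw [List.mem_range] at hr
      show PySem.List.pyGetD (pvHist k m) (((m:Int)+1) - (1 + (r:Int))) 0 = pvVal k (m - r)
      have hi : ((m:Int)+1) - (1 + (r:Int)) = ((m - r : Nat) : Int) := by omega
      rw [hi, PySem.List.pyGetD_natCast]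
      exact pvHist_get k (by omega)
    rw [hmap, pv_sum_map_range]
    refine Finset.sum_nbij' (fun r => m - r) (fun j => m - j) ?_ ?_ ?_ ?_ ?_
    · intro a ha
      dsimp only
      simp only [Finset.mem_range] at ha
      simp only [Finset.mem_Ico]
      omega
    · intro a ha
      dsimp only
      simp only [Finset.mem_Ico] at ha
      simp only [Finset.mem_range]
      omega
    · intro a ha
      dsimp only
      simp only [Finset.mem_range] at ha
      omega
    · intro a ha
      dsimp only
      simp only [Finset.mem_Ico] at ha
      omega
    · intro a ha
      dsimp only

theorem pvW_slide (k : Int) (hk : 1 ≤ k) (m : Nat) :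
    pvW k (m+1) = pvW k m + pvVal k m - (if ((m:Int)+1) > k then pvVal k (m - k.toNat) else 0) := by
  have hkn : 1 ≤ k.toNat := by omega
  rw [pvW, pvW, Finset.sum_Ico_succ_top (by omega)]
  by_cases hgt : ((m:Int)+1) > k
  · rw [if_pos hgt]
    have hlt : m - k.toNat < m := by omega
    rw [Finset.sum_eq_sum_Ico_succ_bot hlt]
    have : m - k.toNat + 1 = m + 1 - k.toNat := by omega
    rw [this]
    ring
  · rw [if_neg hgt]
    have h1 : m + 1 - k.toNat = 0 := by omega
    have h2 : m - k.toNat = 0 := by omega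
    rw [h1, h2]
    ring

theorem pvHist_last (k : Int) (m : Nat) : PySem.List.pyGetD (pvHist k m) (-1) 0 = pvVal k m := by
  cases m with
  | zero => rfl
  | succ m => rw [pvHist_succ, PySem.List.pyGetD_neg_one_append_singleton]

-- B's loop invariant
theorem pvB_loop (k : Int) (hk : 1 ≤ k) : ∀ m : Nat,
    (PySem.List.pyRange 1 ((m:Int)+1) 1).foldl (fun (st : List Int × Int) i =>
        let s := st.2 + PySem.List.pyGetD st.1 (-1) 0
        let s := if i > k then s - PySem.List.pyGetD st.1 (i - 1 - k) 0 else s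
        (st.1 ++ [s], s)) ([1], 0)
    = (pvHist k m, pvW k m) := by
  intro m
  induction m with
  | zero =>
    rw [PySem.List.pyRange_one_eq_nil (by omega), List.foldl_nil]
    have h0 : pvW k 0 = 0 := by rw [pvW]; simp
    rw [h0]
    rfl
  | succ m ih =>
    have h1 : ((m+1:Nat):Int) + 1 = (((m:Nat):Int) + 1) + 1 := by push_cast; ring
    rw [h1, PySem.List.pyRange_one_succ_right (by omega), List.foldl_append, ih,
      List.foldl_cons, List.foldl_nil]
    dsimp only
    rw [pvHist_last]
    by_cases hgt : ((m:Int) + 1) > k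
    · rw [if_pos hgt]
      have hidx : (m:Int) + 1 - 1 - k = ((m - k.toNat : Nat) : Int) := by omega
      rw [hidx, PySem.List.pyGetD_natCast, pvHist_get k (by omega)]
      have hval : pvW k m + pvVal k m - pvVal k (m - k.toNat) = pvVal k (m+1) := by
        rw [pvVal_succ, pvW_slide k hk m, if_pos hgt]
      rw [hval, ← pvHist_succ]
      rw [pvVal_succ]
    · rw [if_neg hgt]
      have hval : pvW k m + pvVal k m = pvVal k (m+1) := by
        rw [pvVal_succ, pvW_slide k hk m, if_neg hgt]
        ring
      rw [hval, ← pvHist_succ]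
      rw [pvVal_succ]

theorem pvB_val (n k : Int) (hn : 1 ≤ n) (hk : 1 ≤ k) :
    climb_stairs_k_steps_alt n k = pvVal k n.toNat := by
  rw [climb_stairs_k_steps_alt, if_neg (by omega), if_neg (by omega)]
  dsimp only
  have hb : n + 1 = ((n.toNat : Nat):Int) + 1 := by omega
  rw [hb, pvB_loop k hk n.toNat]
  have hc : (n:Int) = ((n.toNat : Nat):Int) := by omega
  rw [hc, PySem.List.pyGetD_natCast]
  exact pvHist_get k le_rfl

theorem pvVal_k_nonpos (k : Int) (hk : k ≤ 0) (m : Nat) : pvVal k (m+1) = 0 := by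
  rw [pvVal]
  conv_lhs => rw [pvHist]
  rw [List.getD_append_right _ _ _ _ (by rw [pvHist_length]), pvHist_length,
    PySem.List.pyRange_one_eq_nil (by omega)]
  simp

-- ===== VERDICT (by name: the statement is the Claim_ definition above) =====
theorem climb_stairs_k_steps_spec : Claim_equal_climb_stairs_k_steps := by
  intro n k _
  unfold Spec_climb_stairs_k_steps
  by_cases h0 : n = 0
  · subst h0; rfl
  · by_cases hneg : n < 0
    · rw [climb_stairs_k_steps, if_neg h0, if_pos hneg,
        climb_stairs_k_steps_alt, if_neg h0, if_pos (Or.inl hneg)]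
    · have hn : 1 ≤ n := by omega
      by_cases hk : k ≤ 0
      · rw [climb_stairs_k_steps_alt, if_neg h0, if_pos (Or.inr hk), pvA_val n k hn]
        have : n.toNat = (n.toNat - 1) + 1 := by omega
        rw [this, pvVal_k_nonpos k hk]
      · rw [pvA_val n k hn, pvB_val n k hn (by omega)]
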